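-- pv_equiv track=rewrite | github.com/discodirector/sonoglyph | proxy/glyph-test.py | detect_tile_runs
-- ===== SOURCE A (Python) =====
-- def detect_tile_runs(s: str) -> int:
--     if len(s) < 8:
--         return 0
--     worst = 0
--     for length in range(1, 5):
--         for start in range(0, len(s) - length * 4 + 1):
--             seg = s[start:start + length]
--             reps = 1
--             pos = start + length
--             while pos + length <= len(s) and s[pos:pos + length] == seg:
--                 reps += 1
--                 pos += length
--             if reps >= 4 and reps > worst:
--                 worst = reps
--     return worst
-- ===== SOURCE B (Python) =====
-- def detect_tile_runs(s: str) -> int: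
--     n = len(s)
--     if n < 8:
--         return 0
--     worst = 0
--     for length in range(1, 5):
--         best = 0
--         run = 0
--         for a, b in zip(s, s[length:]):
--             if a == b:
--                 run += 1
--                 if run > best:
--                     best = run
--             else:
--                 run = 0
--         reps = 1 + best // length
--         if reps >= 4 and reps > worst:
--             worst = reps
--     return worst
-- ===== Notes on version B (the rewrite author's own statement) =====
-- stated objective: faster
-- what changed: For each tile length A re-scans and re-compares blocks from every start position (a while-loop per start); B does one pass per tile length over the pairs zip(s, s[length:]), keeping the longest run of adjacent character matches, and derives the best repeat count as 1 + maxrun // length.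
import Mathlib
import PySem

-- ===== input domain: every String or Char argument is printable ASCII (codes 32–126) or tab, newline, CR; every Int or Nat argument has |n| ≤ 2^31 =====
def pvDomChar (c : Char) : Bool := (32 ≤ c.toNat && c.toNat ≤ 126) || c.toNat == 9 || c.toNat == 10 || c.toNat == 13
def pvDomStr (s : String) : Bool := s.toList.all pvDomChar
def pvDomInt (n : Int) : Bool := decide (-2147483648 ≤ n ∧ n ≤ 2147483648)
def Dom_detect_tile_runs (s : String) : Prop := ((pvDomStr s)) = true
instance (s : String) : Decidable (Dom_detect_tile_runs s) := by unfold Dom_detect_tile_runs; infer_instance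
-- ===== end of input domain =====

-- B replaces A's per-start quadratic block re-comparison by a single run-length scan of
-- adjacent character matches per tile length (objective: faster, measured in a timing run).

-- ===== PORT A =====
-- the inner 'while' of A: pos advances by length while s[pos:pos+length] == seg;
-- fuel (= len(s)+1) strictly bounds the number of iterations, so it is never exhausted.
def pvRunsWhile (cs : List Char) (seg : List Char) (length : Int) :
    Nat → Int → Int → Int
  | 0, _, reps => reps
  | fuel + 1, pos, reps =>
    if pos + length ≤ (cs.length : Int) ∧
        PySem.List.slice cs (some pos) (some (pos + length)) = seg then
      pvRunsWhile cs seg length fuel (pos + length) (reps + 1)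
    else reps

def detect_tile_runs (s : String) : Int :=
  let cs := s.toList          -- work on code points; len/slices via PySem.List (exact for str)
  if (cs.length : Int) < 8 then 0
  else
    (PySem.List.pyRange 1 5 1).foldl (fun worst length =>
      (PySem.List.pyRange 0 ((cs.length : Int) - length * 4 + 1) 1).foldl (fun worst start =>
        let seg := PySem.List.slice cs (some start) (some (start + length))
        let reps := pvRunsWhile cs seg length (cs.length + 1) (start + length) 1
        if 4 ≤ reps ∧ worst < reps then reps else worst) worst) 0

-- ===== PORT B =====
def detect_tile_runs_alt (s : String) : Int :=
  let cs := s.toList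
  if (cs.length : Int) < 8 then 0
  else
    (PySem.List.pyRange 1 5 1).foldl (fun worst length =>
      let st := (cs.zip (PySem.List.slice cs (some length) none)).foldl
        (fun (st : Int × Int) ab =>
          if ab.1 = ab.2 then
            let run := st.2 + 1
            (if st.1 < run then run else st.1, run)
          else (st.1, 0)) (0, 0)
      let reps := 1 + PySem.Int.floordiv st.1 length
      if 4 ≤ reps ∧ worst < reps then reps else worst) 0

-- ===== PRECONDITION & SPEC =====
def Spec_detect_tile_runs (s : String) (out : Int) : Prop := out = detect_tile_runs_alt s
instance (s : String) (out : Int) : Decidable (Spec_detect_tile_runs s out) := by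
  unfold Spec_detect_tile_runs; infer_instance

-- ===== CLAIM (what is proved, stated in full; the proofs are below) =====
def Claim_equal_detect_tile_runs : Prop :=
  ∀ (s : String), Dom_detect_tile_runs s → Spec_detect_tile_runs s (detect_tile_runs s)

-- ===== LEMMAS AND PROOFS =====

-- length of the leading run of equal-component pairs
def pvPref : List (Char × Char) → Nat
  | [] => 0
  | ab :: t => if ab.1 = ab.2 then pvPref t + 1 else 0

-- longest run of equal-component pairs anywhere in the list
def pvMrun : List (Char × Char) → Nat
  | [] => 0
  | ab :: t => max (pvPref (ab :: t)) (pvMrun t)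

theorem pvPref_nil : pvPref [] = 0 := rfl

theorem pvPref_cons (ab : Char × Char) (t : List (Char × Char)) :
    pvPref (ab :: t) = if ab.1 = ab.2 then pvPref t + 1 else 0 := rfl

theorem pvMrun_nil : pvMrun [] = 0 := rfl

theorem pvMrun_cons (ab : Char × Char) (t : List (Char × Char)) :
    pvMrun (ab :: t) = max (pvPref (ab :: t)) (pvMrun t) := rfl

theorem pvPref_le_length (p : List (Char × Char)) : pvPref p ≤ p.length := by
  induction p with
  | nil => simp [pvPref_nil]
  | cons ab t ih => rw [pvPref_cons]; simp only [List.length_cons]; split <;> omega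

theorem pvPref_le_mrun (p : List (Char × Char)) : pvPref p ≤ pvMrun p := by
  cases p with
  | nil => simp [pvMrun_nil, pvPref_nil]
  | cons ab t => rw [pvMrun_cons]; omega

theorem pvMrun_le_length (p : List (Char × Char)) : pvMrun p ≤ p.length := by
  induction p with
  | nil => simp [pvMrun_nil]
  | cons ab t ih =>
    have := pvPref_le_length (ab :: t)
    rw [pvMrun_cons]
    simp only [List.length_cons] at *
    omega

theorem pvPref_drop_le_mrun (p : List (Char × Char)) (i : Nat) :
    pvPref (p.drop i) ≤ pvMrun p := by
  induction p generalizing i with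
  | nil => simp [pvMrun_nil, pvPref_nil]
  | cons ab t ih =>
    cases i with
    | zero => exact pvPref_le_mrun _
    | succ j =>
      have := ih j
      simp only [List.drop_succ_cons]
      rw [pvMrun_cons]
      omega

theorem pvMrun_exists (p : List (Char × Char)) :
    ∃ i, pvPref (p.drop i) = pvMrun p := by
  induction p with
  | nil => exact ⟨0, rfl⟩
  | cons ab t ih =>
    obtain ⟨i, hi⟩ := ih
    by_cases h : pvMrun t ≤ pvPref (ab :: t)
    · exact ⟨0, by simp only [List.drop_zero]; rw [pvMrun_cons]; omega⟩
    · exact ⟨i + 1, by simp only [List.drop_succ_cons]; rw [pvMrun_cons]; omega⟩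

-- splitting the leading run
theorem pvPref_drop (p : List (Char × Char)) (m : Nat) (h : m ≤ pvPref p) :
    pvPref p = m + pvPref (p.drop m) := by
  induction m generalizing p with
  | zero => simp
  | succ k ih =>
    cases p with
    | nil => simp [pvPref] at h
    | cons ab t =>
      rw [pvPref_cons] at h ⊢
      by_cases hab : ab.1 = ab.2
      · rw [if_pos hab] at h ⊢
        have := ih t (by omega)
        simp only [List.drop_succ_cons]
        omega
      · rw [if_neg hab] at h
        omega

-- take-equality of two character lists vs the leading run of their zip
theorem pvZipPref (u v : List Char) (k : Nat) (hu : k ≤ u.length) (hv : k ≤ v.length) :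
    (u.take k = v.take k ↔ k ≤ pvPref (u.zip v)) := by
  induction k generalizing u v with
  | zero => simp
  | succ j ih =>
    cases u with
    | nil => simp at hu
    | cons a u' =>
      cases v with
      | nil => simp at hv
      | cons b v' =>
        simp only [List.take_succ_cons, List.zip_cons_cons, List.cons.injEq]
        rw [pvPref_cons]
        by_cases hab : a = b
        · rw [if_pos hab]
          have hih := ih u' v' (by simpa using hu) (by simpa using hv)
          constructor
          · rintro ⟨_, h2⟩; have := hih.1 h2; omega
          · intro h; exact ⟨hab, hih.2 (by omega)⟩
        · rw [if_neg hab]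
          constructor
          · rintro ⟨h1, _⟩; exact absurd h1 hab
          · omega

-- the zip of matches shifted by `start`
theorem pvZipDrop (cs : List Char) (L j : Nat) :
    (cs.zip (cs.drop L)).drop j = (cs.drop j).zip (cs.drop (j + L)) := by
  simp only [List.zip, List.drop_zipWith, List.drop_drop]
  rw [Nat.add_comm L j]

theorem pvMsLength (cs : List Char) (L : Nat) (hL : L ≤ cs.length) :
    (cs.zip (cs.drop L)).length = cs.length - L := by
  simp only [List.length_zip, List.length_drop]
  omega

-- every block equals block 0 as long as the match-run lasts
theorem pvBlock (cs : List Char) (L start : Nat) (hL : 1 ≤ L) :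
    ∀ r : Nat, r * L ≤ pvPref ((cs.zip (cs.drop L)).drop start) →
      start + r * L + L ≤ cs.length →
      (cs.drop (start + r * L)).take L = (cs.drop start).take L := by
  intro r
  induction r with
  | zero => simp
  | succ q ih =>
    intro hpref hlen
    have hq : start + q * L + L ≤ cs.length := by
      have : (q + 1) * L = q * L + L := by ring
      omega
    have hblock := ih (by nlinarith) hq
    rw [← hblock]
    have hsplit := pvPref_drop _ (q * L) (by nlinarith)
    have hLp : L ≤ pvPref (((cs.zip (cs.drop L)).drop start).drop (q * L)) := by
      have : (q + 1) * L = q * L + L := by ring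
      omega
    rw [List.drop_drop, pvZipDrop] at hLp
    have hu : L ≤ (cs.drop (start + q * L)).length := by
      simp [List.length_drop]
      have : (q + 1) * L = q * L + L := by ring
      omega
    have hv : L ≤ (cs.drop (start + q * L + L)).length := by
      simp [List.length_drop]
      have : (q + 1) * L = q * L + L := by ring
      omega
    have := (pvZipPref _ _ L hu hv).2 (by
      have harr : start + q * L + L = q * L + start + L := by ring
      rw [harr]
      convert hLp using 3
      ring)
    have harr : start + (q + 1) * L = start + q * L + L := by ring
    rw [harr]
    exact this.symm

-- characterisation of A's while-loop
theorem pvWhile_spec (cs : List Char) (L start : Nat) (hL : 1 ≤ L)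
    (hstart : start + L ≤ cs.length) :
    ∀ (fuel r : Nat), 1 ≤ r →
      cs.length + 1 ≤ fuel + (start + r * L) →
      (r - 1) * L ≤ pvPref ((cs.zip (cs.drop L)).drop start) →
      pvRunsWhile cs ((cs.drop start).take L) (L : Int) fuel
          (((start + r * L : Nat) : Int)) (r : Int)
        = ((1 + pvPref ((cs.zip (cs.drop L)).drop start) / L : Nat) : Int) := by
  intro fuel
  set P := pvPref ((cs.zip (cs.drop L)).drop start) with hP
  have hPlen : P + L + start ≤ cs.length := by
    have h1 := pvPref_le_length ((cs.zip (cs.drop L)).drop start)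
    have h2 : ((cs.zip (cs.drop L)).drop start).length = cs.length - L - start := by
      rw [List.length_drop, pvMsLength cs L (by omega)]
    omega
  induction fuel with
  | zero =>
    intro r hr hfuel hinv
    obtain ⟨r', rfl⟩ : ∃ r', r = r' + 1 := ⟨r - 1, by omega⟩
    simp only [Nat.add_sub_cancel] at hinv
    have hexp : (r' + 1) * L = r' * L + L := by ring
    simp only [pvRunsWhile]
    have hdiv : P / L = r' := Nat.div_eq_of_lt_le hinv (by omega)
    rw [hdiv]
    omega
  | succ f ih =>
    intro r hr hfuel hinv
    obtain ⟨r', rfl⟩ : ∃ r', r = r' + 1 := ⟨r - 1, by omega⟩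
    simp only [Nat.add_sub_cancel] at hinv
    simp only [pvRunsWhile]
    rw [PySem.List.slice_natCast_add]
    by_cases hcont : start + (r' + 1) * L + L ≤ cs.length
    · -- the block at pos is in range; the comparison is the match-run condition
      have hexp : (r' + 1) * L = r' * L + L := by ring
      have hblk : (cs.drop (start + r' * L)).take L = (cs.drop start).take L :=
        pvBlock cs L start hL r' hinv (by omega)
      have hiff : ((cs.drop (start + (r' + 1) * L)).take L = (cs.drop start).take L)
          ↔ (r' + 1) * L ≤ P := by
        rw [← hblk]
        have hu : L ≤ (cs.drop (start + r' * L)).length := by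
          rw [List.length_drop]; omega
        have hv : L ≤ (cs.drop (start + r' * L + L)).length := by
          rw [List.length_drop]; omega
        have hzp := pvZipPref (cs.drop (start + r' * L)) (cs.drop (start + r' * L + L)) L hu hv
        rw [← pvZipDrop cs L (start + r' * L)] at hzp
        have hdd : (cs.zip (cs.drop L)).drop (start + r' * L)
            = ((cs.zip (cs.drop L)).drop start).drop (r' * L) := by
          rw [List.drop_drop]
        rw [hdd] at hzp
        have hsplit := pvPref_drop ((cs.zip (cs.drop L)).drop start) (r' * L) hinv
        have harr1 : start + (r' + 1) * L = start + r' * L + L := by ring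
        rw [harr1]
        constructor
        · intro h
          have := hzp.1 h.symm
          have h2 : (r' + 1) * L = r' * L + L := by ring
          omega
        · intro h
          have h2 : (r' + 1) * L = r' * L + L := by ring
          exact (hzp.2 (by omega)).symm
      by_cases hmatch : (r' + 1) * L ≤ P
      · rw [if_pos ⟨by exact_mod_cast hcont, hiff.2 hmatch⟩]
        have hpos : ((start + (r' + 1) * L : Nat) : Int) + (L : Int)
            = ((start + (r' + 1 + 1) * L : Nat) : Int) := by push_cast; ring
        have hreps : ((r' + 1 : Nat) : Int) + 1 = ((r' + 1 + 1 : Nat) : Int) := by push_cast; ring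
        rw [hpos, hreps]
        exact ih (r' + 1 + 1) (by omega) (by
            have : (r' + 1 + 1) * L = (r' + 1) * L + L := by ring
            omega)
          (by simp only [Nat.add_sub_cancel]; exact hmatch)
      · rw [if_neg (by
          intro hc
          exact hmatch (hiff.1 hc.2))]
        have hdiv : P / L = r' := by
          apply Nat.div_eq_of_lt_le hinv
          omega
        rw [hdiv]
        omega
    · -- past the end of the string: the while stops
      rw [if_neg (by
        intro hc
        exact hcont (by exact_mod_cast hc.1))]
      have hdiv : P / L = r' := by
        apply Nat.div_eq_of_lt_le hinv
        have : (r' + 1) * L = r' * L + L := by ring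
        omega
      rw [hdiv]
      omega

-- ----- generic facts about the 'if 4 ≤ g ∧ worst < g' fold -----

theorem pvFold_const {α : Type} (g : α → Int) (xs : List α) :
    ∀ w : Int, (∀ x ∈ xs, g x ≤ w) →
      xs.foldl (fun w x => if 4 ≤ g x ∧ w < g x then g x else w) w = w := by
  induction xs with
  | nil => intro w _; rfl
  | cons x t ih =>
    intro w h
    have hx := h x (by simp)
    simp only [List.foldl_cons]
    rw [if_neg (by omega)]
    exact ih w (fun y hy => h y (by simp [hy]))

theorem pvFold_small {α : Type} (g : α → Int) (xs : List α) :
    ∀ w : Int, (∀ x ∈ xs, g x < 4) →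
      xs.foldl (fun w x => if 4 ≤ g x ∧ w < g x then g x else w) w = w := by
  induction xs with
  | nil => intro w _; rfl
  | cons x t ih =>
    intro w h
    have hx := h x (by simp)
    simp only [List.foldl_cons]
    rw [if_neg (by omega)]
    exact ih w (fun y hy => h y (by simp [hy]))

theorem pvFold_max {α : Type} (g : α → Int) (R : Int) (hR : 4 ≤ R) (xs : List α) :
    ∀ w : Int, (∀ x ∈ xs, g x ≤ R) → (∃ x ∈ xs, g x = R) →
      xs.foldl (fun w x => if 4 ≤ g x ∧ w < g x then g x else w) w = max w R := by
  induction xs with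
  | nil => rintro w _ ⟨x, hx, _⟩; simp at hx
  | cons x t ih =>
    intro w hle hex
    simp only [List.foldl_cons]
    by_cases ht : ∃ y ∈ t, g y = R
    · rw [ih _ (fun y hy => hle y (by simp [hy])) ht]
      have hx := hle x (by simp)
      split_ifs <;> omega
    · obtain ⟨y, hy, hgy⟩ := hex
      have hxy : y = x := by
        rcases List.mem_cons.1 hy with h | h
        · exact h
        · exact absurd ⟨y, h, hgy⟩ ht
      subst hxy
      rw [pvFold_const g t _ (fun z hz => by
        have := hle z (by simp [hz]); split_ifs <;> omega)]
      rw [hgy]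
      split_ifs <;> omega

-- ----- B's inner fold computes the longest run -----

theorem pvBFold (p : List (Char × Char)) :
    ∀ best run : Int, 0 ≤ run → run ≤ best →
      (p.foldl (fun (st : Int × Int) ab =>
        if ab.1 = ab.2 then
          let r := st.2 + 1
          (if st.1 < r then r else st.1, r)
        else (st.1, 0)) (best, run)).1
      = max best (max (run + (pvPref p : Int)) ((pvMrun p : Int))) := by
  induction p with
  | nil =>
    intro best run h0 hrb
    simp only [List.foldl_nil, pvPref, pvMrun]
    omega
  | cons ab t ih =>
    intro best run h0 hrb
    simp only [List.foldl_cons]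
    by_cases hab : ab.1 = ab.2
    · rw [if_pos hab]
      have h1 := ih (if best < run + 1 then run + 1 else best) (run + 1) (by omega) (by omega)
      simp only [h1, pvPref, pvMrun, if_pos hab]
      have hp0 : 0 ≤ (pvPref t : Int) := by positivity
      push_cast
      split_ifs <;> omega
    · rw [if_neg hab]
      have h1 := ih best 0 le_rfl (by omega)
      have h2 : (pvPref t : Int) ≤ (pvMrun t : Int) := by exact_mod_cast pvPref_le_mrun t
      have hp0 : 0 ≤ (pvPref ((ab :: t)) : Int) := by positivity
      simp only [h1, pvPref, pvMrun, if_neg hab]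
      push_cast
      omega

-- ----- the per-length step -----

theorem pvPerLNat (cs : List Char) (L : Nat) (hL : 1 ≤ L) (hL4 : L ≤ 4)
    (hn : 8 ≤ cs.length) (worst : Int) :
    (PySem.List.pyRange 0 ((cs.length : Int) - (L : Int) * 4 + 1) 1).foldl
      (fun worst start =>
        let seg := PySem.List.slice cs (some start) (some (start + (L : Int)))
        let reps := pvRunsWhile cs seg (L : Int) (cs.length + 1) (start + (L : Int)) 1
        if 4 ≤ reps ∧ worst < reps then reps else worst) worst
    = (let st := (cs.zip (PySem.List.slice cs (some (L : Int)) none)).foldl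
        (fun (st : Int × Int) ab =>
          if ab.1 = ab.2 then
            let run := st.2 + 1
            (if st.1 < run then run else st.1, run)
          else (st.1, 0)) (0, 0)
       let reps := 1 + PySem.Int.floordiv st.1 (L : Int)
       if 4 ≤ reps ∧ worst < reps then reps else worst) := by
  have hLn : L ≤ cs.length := by omega
  set ms := cs.zip (cs.drop L) with hms
  have hmsl : ms.length = cs.length - L := pvMsLength cs L hLn
  -- B's inner fold computes the longest match-run
  have hslice : PySem.List.slice cs (some (L : Int)) none = cs.drop L :=
    PySem.List.slice_from_natCast cs L
  have hbf := pvBFold ms 0 0 le_rfl le_rfl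
  have hmr : (pvPref ms : Int) ≤ (pvMrun ms : Int) := by exact_mod_cast pvPref_le_mrun ms
  have hmr0 : (0 : Int) ≤ (pvMrun ms : Int) := by positivity
  have hbest : (ms.foldl (fun (st : Int × Int) ab =>
      if ab.1 = ab.2 then
        let run := st.2 + 1
        (if st.1 < run then run else st.1, run)
      else (st.1, 0)) (0, 0)).1 = ((pvMrun ms : Nat) : Int) := by
    rw [hbf]; omega
  simp only [hslice, ← hms, hbest, PySem.Int.floordiv_natCast]
  set R : Int := 1 + ((pvMrun ms / L : Nat) : Int) with hR
  -- 4 ≤ R on the Int side ↔ 3*L ≤ mrun on the Nat side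
  have hRiff : 4 ≤ R ↔ 3 * L ≤ pvMrun ms := by
    rw [hR]
    have h1 : (4 : Int) ≤ 1 + ((pvMrun ms / L : Nat) : Int) ↔ 3 ≤ pvMrun ms / L := by
      constructor
      · intro h; exact_mod_cast (by omega : (3 : Int) ≤ ((pvMrun ms / L : Nat) : Int))
      · intro h; have : (3 : Int) ≤ ((pvMrun ms / L : Nat) : Int) := by exact_mod_cast h
        omega
    rw [h1, Nat.le_div_iff_mul_le (by omega : 0 < L), Nat.mul_comm]
  by_cases hbig : 4 * L ≤ cs.length
  · -- start range is 0 .. n - 4L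
    have hb : (cs.length : Int) - (L : Int) * 4 + 1 = ((cs.length - 4 * L + 1 : Nat) : Int) := by
      push_cast; omega
    rw [hb, PySem.List.pyRange_zero_natCast, List.foldl_map]
    -- each start's while-loop result is 1 + pref(ms.drop start) / L
    have hcong : ∀ (w : Int), ∀ k ∈ List.range (cs.length - 4 * L + 1),
        (fun (worst : Int) (start : Int) =>
          let seg := PySem.List.slice cs (some start) (some (start + (L : Int)))
          let reps := pvRunsWhile cs seg (L : Int) (cs.length + 1) (start + (L : Int)) 1
          if 4 ≤ reps ∧ worst < reps then reps else worst) w ((k : Nat) : Int)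
        = (fun (worst : Int) (k : Nat) =>
            let g := ((1 + pvPref (ms.drop k) / L : Nat) : Int)
            if 4 ≤ g ∧ worst < g then g else worst) w k := by
      intro w k hk
      have hkle : k ≤ cs.length - 4 * L := by
        have := List.mem_range.1 hk; omega
      have hkL : k + L ≤ cs.length := by omega
      simp only
      rw [PySem.List.slice_natCast_add]
      have hpos : ((k : Nat) : Int) + (L : Int) = ((k + 1 * L : Nat) : Int) := by
        push_cast; ring
      rw [hpos, show ((1 : Int)) = ((1 : Nat) : Int) from by norm_num]
      rw [pvWhile_spec cs L k (by omega) hkL (cs.length + 1) 1 le_rfl (by omega)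
        (by simp)]
    rw [List.foldl_ext _ _ worst hcong]
    by_cases h4 : 4 ≤ R
    · -- the longest run is reached from some admissible start
      have h3L : 3 * L ≤ pvMrun ms := hRiff.1 h4
      obtain ⟨i, hi⟩ := pvMrun_exists ms
      have hilen : pvPref (ms.drop i) ≤ ms.length - i := by
        have := pvPref_le_length (ms.drop i)
        simpa [List.length_drop] using this
      have hirange : i ∈ List.range (cs.length - 4 * L + 1) := by
        rw [List.mem_range]; omega
      rw [pvFold_max (fun k => ((1 + pvPref (ms.drop k) / L : Nat) : Int)) R h4 _ worst
        (fun k _ => by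
          show ((1 + pvPref (ms.drop k) / L : Nat) : Int) ≤ R
          have hd : pvPref (ms.drop k) / L ≤ pvMrun ms / L :=
            Nat.div_le_div_right (pvPref_drop_le_mrun ms k)
          rw [hR]; push_cast; omega)
        ⟨i, hirange, by
          show ((1 + pvPref (ms.drop i) / L : Nat) : Int) = R
          rw [hi, hR]; push_cast; rfl⟩]
      split_ifs <;> omega
    · rw [pvFold_small (fun k => ((1 + pvPref (ms.drop k) / L : Nat) : Int)) _ worst
        (fun k _ => by
          show ((1 + pvPref (ms.drop k) / L : Nat) : Int) < 4
          have hd : pvPref (ms.drop k) / L ≤ pvMrun ms / L :=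
            Nat.div_le_div_right (pvPref_drop_le_mrun ms k)
          rw [hR] at h4; push_cast at h4 ⊢; omega)]
      rw [if_neg (by intro hc; exact h4 hc.1)]
  · -- the string is too short for 4 tiles of this length: both sides keep worst
    have hnil : PySem.List.pyRange 0 ((cs.length : Int) - (L : Int) * 4 + 1) 1 = [] := by
      apply PySem.List.pyRange_one_eq_nil
      push_cast; omega
    rw [hnil]
    simp only [List.foldl_nil]
    have hsmall : ¬ (4 ≤ R) := by
      rw [hRiff]
      have := pvMrun_le_length ms
      omega
    rw [if_neg (by intro hc; exact hsmall hc.1)]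

theorem pvPerL (cs : List Char) (Li : Int) (L : Nat) (hcast : Li = (L : Int))
    (hL : 1 ≤ L) (hL4 : L ≤ 4) (hn : 8 ≤ cs.length) (worst : Int) :
    (PySem.List.pyRange 0 ((cs.length : Int) - Li * 4 + 1) 1).foldl
      (fun worst start =>
        let seg := PySem.List.slice cs (some start) (some (start + Li))
        let reps := pvRunsWhile cs seg Li (cs.length + 1) (start + Li) 1
        if 4 ≤ reps ∧ worst < reps then reps else worst) worst
    = (let st := (cs.zip (PySem.List.slice cs (some Li) none)).foldl
        (fun (st : Int × Int) ab =>
          if ab.1 = ab.2 then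
            let run := st.2 + 1
            (if st.1 < run then run else st.1, run)
          else (st.1, 0)) (0, 0)
       let reps := 1 + PySem.Int.floordiv st.1 Li
       if 4 ≤ reps ∧ worst < reps then reps else worst) := by
  subst hcast
  exact pvPerLNat cs L hL hL4 hn worst

-- ===== VERDICT (by name: the statement is the Claim_ definition above) =====
theorem detect_tile_runs_spec : Claim_equal_detect_tile_runs := by
  intro s _
  unfold Spec_detect_tile_runs detect_tile_runs detect_tile_runs_alt
  set cs := s.toList with hcs
  by_cases h8 : (cs.length : Int) < 8
  · simp [h8]
  · rw [if_neg h8, if_neg h8]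
    have hn : 8 ≤ cs.length := by exact_mod_cast not_lt.1 h8
    have hrange : PySem.List.pyRange 1 5 1 = [1, 2, 3, 4] := by decide
    rw [hrange]
    simp only [List.foldl_cons, List.foldl_nil]
    rw [pvPerL cs 1 1 (by norm_num) (by norm_num) (by norm_num) hn,
        pvPerL cs 2 2 (by norm_num) (by norm_num) (by norm_num) hn,
        pvPerL cs 3 3 (by norm_num) (by norm_num) (by norm_num) hn,
        pvPerL cs 4 4 (by norm_num) (by norm_num) (by norm_num) hn]
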